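-- pv_equiv track=rewrite | github.com/sebinbenny/Chat-App | Registration.py | mobcheck
-- ===== SOURCE A (Python) =====
-- def mobcheck(mno):
--     c = 0
--     while mno > 0:
--         c += 1
--         mno = mno // 10
--     if c == 10:
--         return True
--     else:
--         return False
-- ===== SOURCE B (Python) =====
-- def mobcheck(mno):
--     return 10**9 <= mno < 10**10
-- ===== Notes on version B (the rewrite author's own statement) =====
-- stated objective: idiomatic
-- what changed: Replaced the digit-counting division loop with a closed-form magnitude comparison 10**9 <= mno < 10**10.
import Mathlib
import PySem

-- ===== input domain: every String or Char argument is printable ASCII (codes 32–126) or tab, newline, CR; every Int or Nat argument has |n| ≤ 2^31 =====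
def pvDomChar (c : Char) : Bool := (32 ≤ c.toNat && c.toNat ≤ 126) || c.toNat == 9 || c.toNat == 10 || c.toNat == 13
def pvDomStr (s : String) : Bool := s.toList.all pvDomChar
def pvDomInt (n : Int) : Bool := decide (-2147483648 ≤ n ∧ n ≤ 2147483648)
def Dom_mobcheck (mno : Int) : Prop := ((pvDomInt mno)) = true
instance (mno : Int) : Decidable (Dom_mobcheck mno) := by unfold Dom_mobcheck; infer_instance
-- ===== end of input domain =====

-- B replaces A's digit-counting division loop by the closed-form magnitude test 10^9 ≤ mno < 10^10 (idiomatic; same result on all ints).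


-- ===== PORT A =====
-- while mno > 0: c += 1; mno //= 10
def mobcheckLoop (mno c : Int) : Int :=
  if 0 < mno then mobcheckLoop (PySem.Int.floordiv mno 10) (c + 1) else c
termination_by mno.toNat
decreasing_by
  have h : PySem.Int.floordiv mno 10 = mno / 10 :=
    PySem.Int.floordiv_eq_ediv_of_pos (by omega)
  simp only [h]; omega

def mobcheck (mno : Int) : Bool :=
  let c := mobcheckLoop mno 0
  if c = 10 then true else false

-- ===== PORT B =====
def mobcheck_alt (mno : Int) : Bool :=
  decide (10 ^ 9 ≤ mno ∧ mno < 10 ^ 10)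

-- ===== PRECONDITION & SPEC =====
def Spec_mobcheck (mno : Int) (out : Bool) : Prop := out = mobcheck_alt mno
instance (mno : Int) (out : Bool) : Decidable (Spec_mobcheck mno out) := by unfold Spec_mobcheck; infer_instance

-- ===== CLAIM (what is proved, stated in full; the proofs are below) =====
def Claim_equal_mobcheck : Prop := ∀ (mno : Int), Dom_mobcheck mno → Spec_mobcheck mno (mobcheck mno)

-- ===== LEMMAS AND PROOFS =====

theorem mobcheckLoop_ge (mno c : Int) : c ≤ mobcheckLoop mno c := by
  rw [mobcheckLoop]
  split
  · have h : PySem.Int.floordiv mno 10 = mno / 10 :=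
      PySem.Int.floordiv_eq_ediv_of_pos (by omega)
    have := mobcheckLoop_ge (PySem.Int.floordiv mno 10) (c + 1)
    omega
  · omega
termination_by mno.toNat
decreasing_by
  have h : PySem.Int.floordiv mno 10 = mno / 10 :=
    PySem.Int.floordiv_eq_ediv_of_pos (by omega)
  simp only [h]; omega

theorem mobcheckLoop_upper (k : Nat) (mno c : Int) (h : mno < 10 ^ k) :
    mobcheckLoop mno c ≤ c + k := by
  induction k generalizing mno c with
  | zero =>
    rw [mobcheckLoop]
    split
    · omega
    · omega
  | succ k ih =>
    rw [mobcheckLoop]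
    split
    · rename_i hpos
      have hd : PySem.Int.floordiv mno 10 = mno / 10 :=
        PySem.Int.floordiv_eq_ediv_of_pos (by omega)
      have hq := Int.mul_ediv_add_emod mno 10
      have hr1 := Int.emod_nonneg mno (by norm_num : (10:Int) ≠ 0)
      have hr2 := Int.emod_lt_of_pos mno (by norm_num : (0:Int) < 10)
      have hpow : (10:Int) ^ (k + 1) = 10 * 10 ^ k := by ring
      have hlt : mno / 10 < 10 ^ k := by omega
      have := ih (mno / 10) (c + 1) hlt
      rw [hd]; push_cast; omega
    · push_cast; omega

theorem mobcheckLoop_lower (k : Nat) (mno c : Int) (h : (10:Int) ^ k ≤ mno) :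
    c + k + 1 ≤ mobcheckLoop mno c := by
  induction k generalizing mno c with
  | zero =>
    rw [mobcheckLoop]
    split
    · have := mobcheckLoop_ge (PySem.Int.floordiv mno 10) (c + 1); omega
    · simp at h; omega
  | succ k ih =>
    rw [mobcheckLoop]
    have hk : (0:Int) < 10 ^ k := pow_pos (by norm_num) k
    split
    · rename_i hpos
      have hd : PySem.Int.floordiv mno 10 = mno / 10 :=
        PySem.Int.floordiv_eq_ediv_of_pos (by omega)
      have hq := Int.mul_ediv_add_emod mno 10
      have hr2 := Int.emod_lt_of_pos mno (by norm_num : (0:Int) < 10)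
      have hpow : (10:Int) ^ (k + 1) = 10 * 10 ^ k := by ring
      have hle : (10:Int) ^ k ≤ mno / 10 := by omega
      have := ih (mno / 10) (c + 1) hle
      rw [hd]; push_cast; omega
    · have hpow : (10:Int) ^ (k + 1) = 10 * 10 ^ k := by ring
      omega

theorem mobcheckLoop_eq_ten_iff (mno : Int) :
    mobcheckLoop mno 0 = 10 ↔ (10:Int) ^ 9 ≤ mno ∧ mno < 10 ^ 10 := by
  constructor
  · intro h
    constructor
    · by_contra hlt
      have : mno < (10:Int) ^ (9:Nat) := by push_cast at hlt ⊢; omega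
      have := mobcheckLoop_upper 9 mno 0 this
      omega
    · by_contra hge
      have : (10:Int) ^ (10:Nat) ≤ mno := by push_cast at hge ⊢; omega
      have := mobcheckLoop_lower 10 mno 0 this
      omega
  · intro ⟨h1, h2⟩
    have hu := mobcheckLoop_upper 10 mno 0 (by push_cast; omega)
    have hl := mobcheckLoop_lower 9 mno 0 (by push_cast; omega)
    omega

-- ===== VERDICT (by name: the statement is the Claim_ definition above) =====
theorem mobcheck_spec : Claim_equal_mobcheck := by
  intro mno _
  unfold Spec_mobcheck mobcheck mobcheck_alt
  have h := mobcheckLoop_eq_ten_iff mno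
  have h9 : (10:Int) ^ 9 = 1000000000 := by norm_num
  have h10 : (10:Int) ^ 10 = 10000000000 := by norm_num
  by_cases hc : mobcheckLoop mno 0 = 10
  · have := h.mp hc; simp [hc]; omega
  · have : ¬ ((10:Int) ^ 9 ≤ mno ∧ mno < 10 ^ 10) := fun hh => hc (h.mpr hh)
    simp [hc]; omega
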